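-- pv_equiv track=rewrite | github.com/3LENDERMAN/Python_projects | 06/b_happy.py | is_b_happy
-- ===== SOURCE A (Python) =====
-- def is_b_happy(number: int, base: int) -> bool:
--     dont_repetate: set[int] = set()
--     num = number
--     while num != 1:
--         if num in dont_repetate: return False
--         dont_repetate.add(num)
--         temp = num
--         num = 0
--         while temp > 0:
--             num += (temp % base) ** 2
--             temp //= base
--     return True
-- ===== SOURCE B (Python) =====
-- def is_b_happy(number: int, base: int) -> bool:
--     def step(x: int) -> int:
--         if x == 1:
--             return 1  # 1 is terminal: A's loop stops there, so keep it absorbing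
--         s = 0
--         while x > 0:
--             d = x % base
--             s += d * d
--             x //= base
--         return s
--     slow = step(number)
--     fast = step(step(number))
--     while slow != fast:
--         slow = step(slow)
--         fast = step(step(fast))
--     return slow == 1
-- ===== Notes on version B (the rewrite author's own statement) =====
-- stated objective: alternative
-- what changed: Cycle detection by a growing visited set is replaced by Floyd's tortoise-and-hare with a digit-square-sum helper step(x) (1 kept absorbing), so B keeps only two integer pointers instead of a set of all values seen.
import Mathlib
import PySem

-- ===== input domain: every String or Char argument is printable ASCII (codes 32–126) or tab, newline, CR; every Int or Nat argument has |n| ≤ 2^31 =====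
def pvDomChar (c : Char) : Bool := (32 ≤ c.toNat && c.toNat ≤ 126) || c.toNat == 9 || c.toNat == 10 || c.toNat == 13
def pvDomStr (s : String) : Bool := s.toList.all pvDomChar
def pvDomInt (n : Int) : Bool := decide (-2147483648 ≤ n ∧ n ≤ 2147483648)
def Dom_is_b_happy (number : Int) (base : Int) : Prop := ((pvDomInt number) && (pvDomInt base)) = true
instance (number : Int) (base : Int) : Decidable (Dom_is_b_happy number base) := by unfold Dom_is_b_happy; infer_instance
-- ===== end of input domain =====

-- B replaces A's visited-set cycle detection by Floyd's tortoise-and-hare (O(1) extra space); return-value equivalence only.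

-- ===== PORT A =====
-- inner while loop of A: 'temp = num; num = 0; while temp > 0: num += (temp % base) ** 2; temp //= base'
-- (fuel makes the loop total; 1100 exceeds the digit count of every value reachable inside Pre_)
def pvDigits (base : Int) : Nat → Int → Int → Int
  | 0, num, _ => num
  | fuel+1, num, temp =>
    if temp > 0 then
      pvDigits base fuel (num + (PySem.Int.mod temp base) ^ 2) (PySem.Int.floordiv temp base)
    else num

-- outer 'while num != 1' loop of A, carrying the set dont_repetate (fuel 2^80: proved sufficient inside Pre_)
def pvALoop (base : Int) : Nat → PySem.Set Int → Int → Bool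
  | 0, _, _ => false
  | fuel+1, seen, num =>
    if num ≠ 1 then
      if PySem.Set.contains seen num then false
      else pvALoop base fuel (PySem.Set.add seen num) (pvDigits base 1100 0 num)
    else true

def is_b_happy (number : Int) (base : Int) : Bool :=
  pvALoop base (2^80) PySem.Set.empty number

-- ===== PORT B =====
-- B's helper step(x): 's = 0; while x > 0: d = x % base; s += d * d; x //= base'
def pvBSum (base : Int) : Nat → Int → Int → Int
  | 0, s, _ => s
  | fuel+1, s, x =>
    if x > 0 then
      pvBSum base fuel (s + (PySem.Int.mod x base) * (PySem.Int.mod x base)) (PySem.Int.floordiv x base)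
    else s

def pvStep (base : Int) (x : Int) : Int :=
  if x = 1 then 1 else pvBSum base 1100 0 x

-- B's Floyd loop: 'while slow != fast: slow = step(slow); fast = step(step(fast))'
def pvFloyd (base : Int) : Nat → Int → Int → Bool
  | 0, _, _ => false
  | fuel+1, slow, fast =>
    if slow ≠ fast then
      pvFloyd base fuel (pvStep base slow) (pvStep base (pvStep base fast))
    else decide (slow = 1)

def is_b_happy_alt (number : Int) (base : Int) : Bool :=
  pvFloyd base (2^80) (pvStep base number) (pvStep base (pvStep base number))

-- ===== PRECONDITION & SPEC =====
-- Pre_ excludes base = 0, where A raises ZeroDivisionError, and base = 1 with number ≥ 2,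
-- where A (and B) loop forever.
def Pre_is_b_happy (number : Int) (base : Int) : Prop := base ≠ 0 ∧ (base ≠ 1 ∨ number ≤ 1)
instance (number : Int) (base : Int) : Decidable (Pre_is_b_happy number base) := by unfold Pre_is_b_happy; infer_instance
def pvWitness_is_b_happy : Int × Int := (7, 10)

def Spec_is_b_happy (number : Int) (base : Int) (out : Bool) : Prop := out = is_b_happy_alt number base
instance (number : Int) (base : Int) (out : Bool) : Decidable (Spec_is_b_happy number base out) := by unfold Spec_is_b_happy; infer_instance

-- ===== CLAIM (what is proved, stated in full; the proofs are below) =====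
def Claim_equal_is_b_happy : Prop := ∀ (number : Int) (base : Int), Dom_is_b_happy number base → Pre_is_b_happy number base → Spec_is_b_happy number base (is_b_happy number base)

-- ===== LEMMAS AND PROOFS =====

-- A's step function (inner loop started with accumulator 0), as iterated by the outer loop
def pvG (base : Int) (x : Int) : Int := pvDigits base 1100 0 x

lemma pvDigits_shift (base : Int) : ∀ (f : Nat) (s x : Int), pvDigits base f s x = s + pvDigits base f 0 x := by
  intro f
  induction f with
  | zero => intro s x; simp [pvDigits]
  | succ f ih =>
    intro s x
    simp only [pvDigits]
    split
    · rw [ih, ih ((0:Int) + _)]; ring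
    · simp

lemma pvBSum_eq (base : Int) : ∀ (f : Nat) (s x : Int), pvBSum base f s x = pvDigits base f s x := by
  intro f
  induction f with
  | zero => intro s x; simp [pvBSum, pvDigits]
  | succ f ih =>
    intro s x
    simp only [pvBSum, pvDigits]
    split
    · rw [ih]; ring_nf
    · rfl

lemma pvStep_eq (base x : Int) : pvStep base x = if x = 1 then 1 else pvG base x := by
  simp only [pvStep, pvG, pvBSum_eq]

lemma pvMod_sq_le (x base : Int) (hb : base ≠ 0) :
    0 ≤ (PySem.Int.mod x base) ^ 2 ∧ (PySem.Int.mod x base) ^ 2 ≤ base ^ 2 := by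
  rcases lt_or_gt_of_ne hb with h | h
  · have := PySem.Int.mod_neg_bounds (a := x) h
    constructor
    · positivity
    · nlinarith [this.1, this.2]
  · have h1 := PySem.Int.mod_nonneg (a := x) h
    have h2 := PySem.Int.mod_lt (a := x) h
    constructor
    · positivity
    · nlinarith

lemma pvDigits_bounds (base : Int) (hb : base ≠ 0) :
    ∀ (f : Nat) (x : Int), 0 ≤ pvDigits base f 0 x ∧ pvDigits base f 0 x ≤ (f : Int) * base ^ 2 := by
  intro f
  induction f with
  | zero => intro x; simp [pvDigits]
  | succ f ih =>
    intro x
    simp only [pvDigits]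
    split
    · rw [pvDigits_shift]
      have hm := pvMod_sq_le x base hb
      have hx := ih (PySem.Int.floordiv x base)
      push_cast
      constructor
      · nlinarith [hm.1, hx.1]
      · nlinarith [hm.2, hx.2]
    · exact ⟨le_refl 0, by positivity⟩

lemma pvG_mem (base : Int) (hb : base ≠ 0) (x : Int) :
    pvG base x ∈ Finset.Icc (-(2^31) : Int) (1100 * base ^ 2 + 2^31) := by
  have h := pvDigits_bounds base hb 1100 x
  simp only [Finset.mem_Icc, pvG]
  constructor
  · omega
  · have : ((1100 : Nat) : Int) = 1100 := by norm_num
    omega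

lemma pvStep_mem (base : Int) (hb : base ≠ 0) (x : Int) :
    pvStep base x ∈ Finset.Icc (-(2^31) : Int) (1100 * base ^ 2 + 2^31) := by
  rw [pvStep_eq]
  split
  · simp only [Finset.mem_Icc]
    have : (0:Int) ≤ base ^ 2 := by positivity
    omega
  · exact pvG_mem base hb x

-- generic orbit lemmas
lemma pvOrbit_mem (f : Int → Int) (n lo hi : Int) (hn : n ∈ Finset.Icc lo hi)
    (hf : ∀ z, f z ∈ Finset.Icc lo hi) : ∀ i, f^[i] n ∈ Finset.Icc lo hi := by
  intro i
  induction i with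
  | zero => simpa using hn
  | succ i ih => rw [Function.iterate_succ_apply']; exact hf _

lemma pvOrbit_periodic (f : Int → Int) (n : Int) (i j : Nat) (hij : i ≤ j)
    (hrep : f^[i] n = f^[j] n) : ∀ m, i ≤ m → f^[m + (j - i)] n = f^[m] n := by
  intro m hm
  have h1 : m + (j - i) = (m - i) + j := by omega
  have h2 : m = (m - i) + i := by omega
  rw [h1, Function.iterate_add_apply, ← hrep, ← Function.iterate_add_apply, ← h2]

lemma pvOrbit_periodic_mul (f : Int → Int) (n : Int) (i j : Nat) (hij : i ≤ j)
    (hrep : f^[i] n = f^[j] n) : ∀ (c m : Nat), i ≤ m → f^[m + c * (j - i)] n = f^[m] n := by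
  intro c
  induction c with
  | zero => intro m hm; simp
  | succ c ih =>
    intro m hm
    have h1 : m + (c + 1) * (j - i) = (m + c * (j - i)) + (j - i) := by ring
    rw [h1, pvOrbit_periodic f n i j hij hrep _ (by omega), ih m hm]

lemma pvLeast_one_distinct (f : Int → Int) (n : Int) (k : Nat) (h1 : f^[k] n = 1)
    (hmin : ∀ m, m < k → f^[m] n ≠ 1) :
    ∀ i j, i < j → j ≤ k → f^[i] n ≠ f^[j] n := by
  intro i j hij hjk heq
  have hp : 1 ≤ j - i := by omega
  have hper := pvOrbit_periodic f n i j (by omega) heq (k - (j - i)) (by omega)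
  have hkk : k - (j - i) + (j - i) = k := by omega
  rw [hkk] at hper
  exact hmin (k - (j - i)) (by omega) (hper.symm.trans h1)

lemma pvLeast_one_lt (f : Int → Int) (n lo hi : Int) (k : Nat)
    (horb : ∀ i, f^[i] n ∈ Finset.Icc lo hi) (h1 : f^[k] n = 1)
    (hmin : ∀ m, m < k → f^[m] n ≠ 1) : (k : Int) < hi + 1 - lo := by
  by_contra hcon
  push Not at hcon
  have hcard : (Finset.Icc lo hi).card < (Finset.range (k + 1)).card := by
    rw [Int.card_Icc, Finset.card_range]
    omega
  obtain ⟨i, hi, j, hj, hne, heq⟩ :=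
    Finset.exists_ne_map_eq_of_card_lt_of_maps_to hcard (fun i _ => horb i)
  simp only [Finset.mem_range] at hi hj
  rcases lt_or_gt_of_ne hne with h | h
  · exact pvLeast_one_distinct f n k h1 hmin i j h (by omega) heq
  · exact pvLeast_one_distinct f n k h1 hmin j i h (by omega) heq.symm

-- A-side characterization
lemma pvALoop_exists_of_true (base : Int) :
    ∀ (fuel : Nat) (seen : PySem.Set Int) (num : Int),
      pvALoop base fuel seen num = true → ∃ i, (pvG base)^[i] num = 1 := by
  intro fuel
  induction fuel with
  | zero => intro seen num h; simp [pvALoop] at h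
  | succ fuel ih =>
    intro seen num h
    simp only [pvALoop] at h
    by_cases h1 : num = 1
    · exact ⟨0, by simpa using h1⟩
    · rw [if_pos h1] at h
      cases hc : PySem.Set.contains seen num with
      | true => rw [hc] at h; simp at h
      | false =>
        rw [hc] at h
        simp only [Bool.false_eq_true, if_false] at h
        obtain ⟨i, hi⟩ := ih _ _ h
        exact ⟨i + 1, by rw [Function.iterate_succ_apply]; exact hi⟩

lemma pvALoop_true (base n : Int) (k : Nat) (h1 : (pvG base)^[k] n = 1)
    (hmin : ∀ m, m < k → (pvG base)^[m] n ≠ 1) :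
    ∀ (fuel : Nat), ∀ (t : Nat) (seen : PySem.Set Int), t ≤ k → k - t < fuel →
      (∀ z : Int, PySem.Set.contains seen z = true ↔ ∃ i, i < t ∧ (pvG base)^[i] n = z) →
      pvALoop base fuel seen ((pvG base)^[t] n) = true := by
  intro fuel
  induction fuel with
  | zero => intro t seen ht hf; omega
  | succ fuel ih =>
    intro t seen ht hf hseen
    simp only [pvALoop]
    by_cases htk : t = k
    · subst htk
      rw [h1]
      simp
    · have htk' : t < k := by omega
      have hne1 : (pvG base)^[t] n ≠ 1 := hmin t htk'
      rw [if_pos hne1]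
      have hc : PySem.Set.contains seen ((pvG base)^[t] n) = false := by
        cases hc : PySem.Set.contains seen ((pvG base)^[t] n) with
        | false => rfl
        | true =>
          obtain ⟨i, hilt, hieq⟩ := (hseen _).mp hc
          exact absurd hieq (pvLeast_one_distinct (pvG base) n k h1 hmin i t hilt (by omega))
      rw [hc]
      simp only [Bool.false_eq_true, if_false]
      have hnext : pvDigits base 1100 0 ((pvG base)^[t] n) = (pvG base)^[t+1] n := by
        rw [Function.iterate_succ_apply']; rfl
      rw [hnext]
      apply ih (t + 1) _ (by omega) (by omega)
      intro z
      rw [PySem.Set.contains_iff, PySem.Set.mem_add, ← PySem.Set.contains_iff]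
      constructor
      · rintro (hz | hz)
        · obtain ⟨i, hi, he⟩ := (hseen z).mp (by rwa [PySem.Set.contains_iff, ← PySem.Set.contains_iff] at hz)
          exact ⟨i, by omega, he⟩
        · exact ⟨t, by omega, hz.symm⟩
      · rintro ⟨i, hi, he⟩
        by_cases hit : i = t
        · right; rw [← he, hit]
        · left
          rw [PySem.Set.contains_iff]
          exact PySem.Set.contains_iff .. |>.mp ((hseen z).mpr ⟨i, by omega, he⟩)

-- B-side characterization
lemma pvStep_iterate_one (base : Int) : ∀ d, (pvStep base)^[d] 1 = 1 := by
  intro d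
  induction d with
  | zero => rfl
  | succ d ih => rw [Function.iterate_succ_apply', ih]; simp [pvStep]

lemma pvStep_absorb (base n : Int) (k : Nat) (h1 : (pvStep base)^[k] n = 1) :
    ∀ m, k ≤ m → (pvStep base)^[m] n = 1 := by
  intro m hm
  have : m = (m - k) + k := by omega
  rw [this, Function.iterate_add_apply, h1, pvStep_iterate_one]

lemma pvFloyd_exists_of_true (base n : Int) :
    ∀ (fuel : Nat) (t : Nat),
      pvFloyd base fuel ((pvStep base)^[1+t] n) ((pvStep base)^[2+2*t] n) = true →
      ∃ i, (pvStep base)^[i] n = 1 := by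
  intro fuel
  induction fuel with
  | zero => intro t h; simp [pvFloyd] at h
  | succ fuel ih =>
    intro t h
    simp only [pvFloyd] at h
    by_cases hne : (pvStep base)^[1+t] n ≠ (pvStep base)^[2+2*t] n
    · rw [if_pos hne] at h
      have e1 : pvStep base ((pvStep base)^[1+t] n) = (pvStep base)^[1+(t+1)] n := by
        rw [show 1+(t+1) = (1+t)+1 by omega, Function.iterate_succ_apply']
      have e2 : pvStep base (pvStep base ((pvStep base)^[2+2*t] n)) = (pvStep base)^[2+2*(t+1)] n := by
        rw [show 2+2*(t+1) = ((2+2*t)+1)+1 by omega, Function.iterate_succ_apply', Function.iterate_succ_apply']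
      rw [e1, e2] at h
      exact ih (t + 1) h
    · rw [if_neg hne] at h
      exact ⟨1 + t, by simpa using h⟩

lemma pvMeet_one (base n : Int) (k T : Nat) (hk1 : (pvStep base)^[k] n = 1)
    (hmeet : (pvStep base)^[1+T] n = (pvStep base)^[2+2*T] n) :
    (pvStep base)^[1+T] n = 1 := by
  have habs := pvStep_absorb base n k hk1
  have hmul := pvOrbit_periodic_mul (pvStep base) n (1+T) (2+2*T) (by omega) hmeet k (1+T) (le_refl _)
  have hj : (2+2*T) - (1+T) = T + 1 := by omega
  rw [hj] at hmul
  rw [← hmul]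
  exact habs _ (by nlinarith)

lemma pvFloyd_true (base n : Int) (T : Nat)
    (hmeet : (pvStep base)^[1+T] n = (pvStep base)^[2+2*T] n)
    (hminT : ∀ t, t < T → (pvStep base)^[1+t] n ≠ (pvStep base)^[2+2*t] n)
    (hone : (pvStep base)^[1+T] n = 1) :
    ∀ (fuel : Nat), ∀ (t : Nat), t ≤ T → T - t < fuel →
      pvFloyd base fuel ((pvStep base)^[1+t] n) ((pvStep base)^[2+2*t] n) = true := by
  intro fuel
  induction fuel with
  | zero => intro t ht hf; omega
  | succ fuel ih =>
    intro t ht hf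
    simp only [pvFloyd]
    by_cases htT : t = T
    · subst htT
      rw [if_neg (by simpa using hmeet), hone]
      simp
    · have hne : (pvStep base)^[1+t] n ≠ (pvStep base)^[2+2*t] n := hminT t (by omega)
      rw [if_pos hne]
      have e1 : pvStep base ((pvStep base)^[1+t] n) = (pvStep base)^[1+(t+1)] n := by
        rw [show 1+(t+1) = (1+t)+1 by omega, Function.iterate_succ_apply']
      have e2 : pvStep base (pvStep base ((pvStep base)^[2+2*t] n)) = (pvStep base)^[2+2*(t+1)] n := by
        rw [show 2+2*(t+1) = ((2+2*t)+1)+1 by omega, Function.iterate_succ_apply', Function.iterate_succ_apply']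
      rw [e1, e2]
      exact ih (t + 1) (by omega) (by omega)

-- bridge between the two step functions (pvStep makes 1 absorbing)
lemma pvBridge_h (base n : Int) :
    ∀ i, (∀ m, m < i → (pvStep base)^[m] n ≠ 1) → (pvStep base)^[i] n = (pvG base)^[i] n := by
  intro i
  induction i with
  | zero => intro _; rfl
  | succ i ih =>
    intro hm
    have hi := ih (fun m hmi => hm m (by omega))
    rw [Function.iterate_succ_apply', Function.iterate_succ_apply', hi, pvStep_eq,
        if_neg (by rw [← hi]; exact hm i (by omega))]

lemma pvBridge_g (base n : Int) :
    ∀ i, (∀ m, m < i → (pvG base)^[m] n ≠ 1) → (pvStep base)^[i] n = (pvG base)^[i] n := by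
  intro i
  induction i with
  | zero => intro _; rfl
  | succ i ih =>
    intro hm
    have hi := ih (fun m hmi => hm m (by omega))
    rw [Function.iterate_succ_apply', Function.iterate_succ_apply', hi, pvStep_eq,
        if_neg (hm i (by omega))]

lemma pvExists_iff (base n : Int) :
    (∃ i, (pvG base)^[i] n = 1) ↔ (∃ i, (pvStep base)^[i] n = 1) := by
  constructor
  · rintro h
    classical
    let k := Nat.find h
    refine ⟨k, ?_⟩
    rw [pvBridge_g base n k (fun m hm => Nat.find_min h hm)]
    exact Nat.find_spec h
  · rintro h
    classical
    let k := Nat.find h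
    refine ⟨k, ?_⟩
    rw [← pvBridge_h base n k (fun m hm => Nat.find_min h hm)]
    exact Nat.find_spec h

-- ===== VERDICT (by name: the statement is the Claim_ definition above) =====
theorem is_b_happy_spec : Claim_equal_is_b_happy := by
  intro n base hdom hpre
  obtain ⟨hb0, -⟩ := hpre
  simp only [Dom_is_b_happy, pvDomInt, Bool.and_eq_true, decide_eq_true_eq] at hdom
  obtain ⟨⟨hn1, hn2⟩, hbl, hbu⟩ := hdom
  have hb2 : base ^ 2 ≤ (2:Int)^62 := by nlinarith
  have hb2nn : (0:Int) ≤ base ^ 2 := sq_nonneg base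
  have hnmem : n ∈ Finset.Icc (-(2^31) : Int) (1100 * base ^ 2 + 2^31) := by
    simp only [Finset.mem_Icc]
    constructor <;> nlinarith
  have horbg : ∀ i, (pvG base)^[i] n ∈ Finset.Icc (-(2^31) : Int) (1100 * base ^ 2 + 2^31) :=
    pvOrbit_mem (pvG base) n _ _ hnmem (pvG_mem base hb0)
  have horbh : ∀ i, (pvStep base)^[i] n ∈ Finset.Icc (-(2^31) : Int) (1100 * base ^ 2 + 2^31) :=
    pvOrbit_mem (pvStep base) n _ _ hnmem (pvStep_mem base hb0)
  show is_b_happy n base = is_b_happy_alt n base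
  classical
  by_cases hex : ∃ i, (pvG base)^[i] n = 1
  · -- both sides return true
    have hk1 := Nat.find_spec hex
    have hkmin : ∀ m, m < Nat.find hex → (pvG base)^[m] n ≠ 1 := fun m hm => Nat.find_min hex hm
    have hklt := pvLeast_one_lt (pvG base) n _ _ (Nat.find hex) horbg hk1 hkmin
    have hk80 : Nat.find hex < 2^80 := by
      have h1 : ((Nat.find hex : Nat) : Int) < 2^80 := by nlinarith
      exact_mod_cast h1
    have hA : is_b_happy n base = true := by
      have hseed : ∀ z : Int, PySem.Set.contains (PySem.Set.empty : PySem.Set Int) z = true ↔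
          ∃ i, i < 0 ∧ (pvG base)^[i] n = z := by
        intro z
        constructor
        · intro hz
          rw [PySem.Set.contains_iff] at hz
          simp [PySem.Set.empty] at hz
        · rintro ⟨i, hi, -⟩; omega
      have := pvALoop_true base n (Nat.find hex) hk1 hkmin (2^80) 0 PySem.Set.empty
        (Nat.zero_le _) (by omega) hseed
      simpa [is_b_happy] using this
    have hexh : ∃ i, (pvStep base)^[i] n = 1 := (pvExists_iff base n).mp hex
    have hk1h := Nat.find_spec hexh
    have hkminh : ∀ m, m < Nat.find hexh → (pvStep base)^[m] n ≠ 1 := fun m hm => Nat.find_min hexh hm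
    have hmeetEx : ∃ t, (pvStep base)^[1+t] n = (pvStep base)^[2+2*t] n := by
      refine ⟨Nat.find hexh, ?_⟩
      rw [pvStep_absorb base n _ hk1h (1 + Nat.find hexh) (by omega),
          pvStep_absorb base n _ hk1h (2 + 2 * Nat.find hexh) (by omega)]
    have hmeet := Nat.find_spec hmeetEx
    have hminT : ∀ t, t < Nat.find hmeetEx →
        (pvStep base)^[1+t] n ≠ (pvStep base)^[2+2*t] n := fun t ht => Nat.find_min hmeetEx ht
    have hone := pvMeet_one base n (Nat.find hexh) (Nat.find hmeetEx) hk1h hmeet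
    have hTle : Nat.find hmeetEx ≤ Nat.find hexh := by
      apply Nat.find_min' hmeetEx
      rw [pvStep_absorb base n _ hk1h (1 + Nat.find hexh) (by omega),
          pvStep_absorb base n _ hk1h (2 + 2 * Nat.find hexh) (by omega)]
    have hklth := pvLeast_one_lt (pvStep base) n _ _ (Nat.find hexh) horbh hk1h hkminh
    have hT80 : Nat.find hmeetEx < 2^80 := by
      have h1 : ((Nat.find hexh : Nat) : Int) < 2^80 := by nlinarith
      have h2 : Nat.find hexh < 2^80 := by exact_mod_cast h1
      omega
    have hB : is_b_happy_alt n base = true := by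
      have := pvFloyd_true base n (Nat.find hmeetEx) hmeet hminT hone (2^80) 0
        (Nat.zero_le _) (by omega)
      simpa [is_b_happy_alt, Function.iterate_succ_apply, Function.iterate_one] using this
    rw [hA, hB]
  · -- both sides return false
    have hexh : ¬ ∃ i, (pvStep base)^[i] n = 1 := fun h => hex ((pvExists_iff base n).mpr h)
    have hA : is_b_happy n base = false := by
      cases hA : is_b_happy n base with
      | false => rfl
      | true =>
        exact absurd (pvALoop_exists_of_true base (2^80) PySem.Set.empty n hA) hex
    have hB : is_b_happy_alt n base = false := by
      cases hB : is_b_happy_alt n base with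
      | false => rfl
      | true =>
        refine absurd (pvFloyd_exists_of_true base n (2^80) 0 ?_) hexh
        have e1 : (pvStep base)^[1+0] n = pvStep base n := by simp
        have e2 : (pvStep base)^[2+2*0] n = pvStep base (pvStep base n) := by
          show (pvStep base)^[2] n = _
          rw [show (2:Nat) = 1 + 1 by rfl, Function.iterate_add_apply]
          simp
        rw [e1, e2]
        exact hB
    rw [hA, hB]
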